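-- pv_equiv track=rewrite | github.com/leofiber/DS--file | 57th.py | postorder_to_preorder
-- ===== SOURCE A (Python) =====
-- def postorder_to_preorder(postorder):
--     if not postorder:
--         return []
--
--     root_val = postorder[-1]
--     postorder.pop()
--
--     if not postorder:
--         return [root_val]
--
--     left_postorder = []
--     right_postorder = []
--
--     for val in postorder:
--         if val < root_val:
--             left_postorder.append(val)
--         else:
--             right_postorder.append(val)
--
--     left_preorder = postorder_to_preorder(left_postorder)
--     right_preorder = postorder_to_preorder(right_postorder)
--
--     return [root_val] + left_preorder + right_preorder
-- ===== SOURCE B (Python) =====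
-- def postorder_to_preorder(postorder):
--     # Build the BST by inserting values in reversed postorder (iterative descent,
--     # nodes as [val, left, right]), then emit preorder with an explicit stack.
--     # Does not mutate its argument (A pops the last element of its input).
--     if not postorder:
--         return []
--     it = reversed(postorder)
--     root = [next(it), None, None]
--     for v in it:
--         cur = root
--         while True:
--             i = 1 if v < cur[0] else 2
--             if cur[i] is None:
--                 cur[i] = [v, None, None]
--                 break
--             cur = cur[i]
--     out, stack = [], [root]
--     while stack:
--         node = stack.pop()
--         out.append(node[0])
--         if node[2] is not None:
--             stack.append(node[2])
--         if node[1] is not None: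
--             stack.append(node[1])
--     return out
-- ===== Notes on version B (the rewrite author's own statement) =====
-- stated objective: alternative
-- what changed: Replaces A's recursive partition-by-root (which copies and splits sublists at every level) by building the BST once via iterative insertion over the reversed postorder and then emitting preorder with an explicit stack; A also mutates its argument (pop), B does not.
import Mathlib
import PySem

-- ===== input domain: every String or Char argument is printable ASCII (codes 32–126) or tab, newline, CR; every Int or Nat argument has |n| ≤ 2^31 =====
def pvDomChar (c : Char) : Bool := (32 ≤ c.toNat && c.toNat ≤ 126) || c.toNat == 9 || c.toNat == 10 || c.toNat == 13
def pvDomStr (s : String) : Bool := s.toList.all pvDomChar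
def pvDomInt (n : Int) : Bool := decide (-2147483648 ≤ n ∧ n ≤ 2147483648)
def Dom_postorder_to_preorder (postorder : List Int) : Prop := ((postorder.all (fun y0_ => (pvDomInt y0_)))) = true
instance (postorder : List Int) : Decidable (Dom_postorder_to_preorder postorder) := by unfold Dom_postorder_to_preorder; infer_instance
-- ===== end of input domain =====

-- B builds the BST once by inserting the reversed postorder and preorder-traverses it with an
-- explicit stack, instead of A's recursive partition-by-root; return values proved equal.
-- (A mutates its argument via pop, B does not — the equivalence is about the return value only.)

-- ===== PORT A =====
-- the for-loop that appends each value to left_postorder / right_postorder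
def pvPartFold (root : Int) (acc : List Int × List Int) (l : List Int) : List Int × List Int :=
  l.foldl (fun p v => if v < root then (p.1 ++ [v], p.2) else (p.1, p.2 ++ [v])) acc

-- needed by the port's decreasing_by
theorem pvPartFold_eq (root : Int) (acc : List Int × List Int) (l : List Int) :
    pvPartFold root acc l =
      (acc.1 ++ l.filter (fun v => v < root), acc.2 ++ l.filter (fun v => ¬ v < root)) := by
  induction l generalizing acc with
  | nil => simp [pvPartFold]
  | cons x xs ih =>
    simp only [pvPartFold, List.foldl_cons] at *
    by_cases h : x < root <;> simp [h, ih, List.filter_cons]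

def postorder_to_preorder (postorder : List Int) : List Int :=
  if h : postorder = [] then []
  else
    let root_val := postorder.getLast h          -- postorder[-1]
    let rest := postorder.dropLast               -- postorder.pop()
    if rest = [] then [root_val]
    else
      let parts := pvPartFold root_val ([], []) rest
      [root_val] ++ postorder_to_preorder parts.1 ++ postorder_to_preorder parts.2
termination_by postorder.length
decreasing_by
  all_goals
    have hlen : postorder.dropLast.length < postorder.length := by
      cases postorder with
      | nil => simp at h
      | cons a as => simp [List.length_dropLast]
    first
    | (have hb : (pvPartFold (postorder.getLast h) ([], []) postorder.dropLast).1.length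
          ≤ postorder.dropLast.length := by
        rw [pvPartFold_eq]; simp only [List.nil_append]; exact List.length_filter_le _ _
       omega)
    | (have hb : (pvPartFold (postorder.getLast h) ([], []) postorder.dropLast).2.length
          ≤ postorder.dropLast.length := by
        rw [pvPartFold_eq]; simp only [List.nil_append]; exact List.length_filter_le _ _
       omega)

-- ===== PORT B =====
inductive PvTree where
  | leaf : PvTree                               -- Python's None
  | node : Int → PvTree → PvTree → PvTree       -- a node [val, left, right]
deriving DecidableEq, Repr

-- the inner while-loop of B: descend left on v < cur[0], else right, until a None slot
def pvInsert (t : PvTree) (v : Int) : PvTree :=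
  match t with
  | .leaf => .node v .leaf .leaf
  | .node x l r => if v < x then .node x (pvInsert l v) r else .node x l (pvInsert r v)

def pvSize : PvTree → Nat
  | .leaf => 1
  | .node _ l r => 1 + pvSize l + pvSize r

-- the output while-loop: pop a node, emit its value, push right then left
-- (the Python pushes only non-None children; here the None check happens at pop — same output)
def pvPreLoop (stack : List PvTree) (out : List Int) : List Int :=
  match stack with
  | [] => out
  | .leaf :: s => pvPreLoop s out
  | .node v l r :: s => pvPreLoop (l :: r :: s) (out ++ [v])
termination_by (stack.map pvSize).sum
decreasing_by all_goals simp [pvSize] <;> omega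

def postorder_to_preorder_alt (postorder : List Int) : List Int :=
  match postorder.reverse with
  | [] => []
  | v :: rest =>
    let root := PvTree.node v .leaf .leaf
    let tree := rest.foldl pvInsert root
    pvPreLoop [tree] []

-- ===== PRECONDITION & SPEC =====
def Spec_postorder_to_preorder (postorder : List Int) (out : List Int) : Prop := out = postorder_to_preorder_alt postorder
instance (postorder : List Int) (out : List Int) : Decidable (Spec_postorder_to_preorder postorder out) := by unfold Spec_postorder_to_preorder; infer_instance

-- ===== CLAIM (what is proved, stated in full; the proofs are below) =====
def Claim_equal_postorder_to_preorder : Prop := ∀ (postorder : List Int), Dom_postorder_to_preorder postorder → Spec_postorder_to_preorder postorder (postorder_to_preorder postorder)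

-- ===== LEMMAS AND PROOFS =====

-- recursive preorder, used only to reason about pvPreLoop
def pvPre : PvTree → List Int
  | .leaf => []
  | .node v l r => v :: (pvPre l ++ pvPre r)

theorem pvPreLoop_cons (t : PvTree) (s : List PvTree) (out : List Int) :
    pvPreLoop (t :: s) out = pvPreLoop s (out ++ pvPre t) := by
  induction t generalizing s out with
  | leaf => simp [pvPreLoop, pvPre]
  | node v l r ihl ihr =>
    rw [pvPreLoop, ihl, ihr]
    simp [pvPre]

theorem pvInsert_split (x : Int) (l r : PvTree) (ys : List Int) :
    ys.foldl pvInsert (.node x l r) =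
      .node x ((ys.filter (fun v => decide (v < x))).foldl pvInsert l)
             ((ys.filter (fun v => !decide (v < x))).foldl pvInsert r) := by
  induction ys generalizing l r with
  | nil => simp
  | cons y ys ih =>
    by_cases h : y < x <;> simp [h, pvInsert, ih]

theorem pvA_eq_pre_fold : ∀ (n : Nat) (post : List Int), post.length ≤ n →
    postorder_to_preorder post = pvPre (post.reverse.foldl pvInsert .leaf) := by
  intro n
  induction n with
  | zero =>
    intro post hlen
    have : post = [] := List.eq_nil_of_length_eq_zero (Nat.le_zero.mp hlen)
    subst this
    simp [postorder_to_preorder, pvPre]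
  | succ n ih =>
    intro post hlen
    by_cases hpost : post = []
    · subst hpost; simp [postorder_to_preorder, pvPre]
    · have hsplit := (List.dropLast_append_getLast hpost).symm
      set root := post.getLast hpost with hroot
      set rest := post.dropLast with hrest
      have hrlen : rest.length + 1 = post.length := by
        rw [hsplit]; simp
      by_cases hr : rest = []
      · -- post = [root]
        have hp : post = [root] := by rw [hsplit, hr]; simp
        rw [postorder_to_preorder]
        simp only [hpost, ← hroot, ← hrest, hr]
        rw [hp]
        simp [pvInsert, pvPre]
      · rw [postorder_to_preorder]
        simp only [hpost, ← hroot, ← hrest, if_neg hr]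
        rw [pvPartFold_eq]
        have hle : rest.length ≤ n := by omega
        have h1 := ih (rest.filter (fun v => decide (v < root)))
          (le_trans (List.length_filter_le _ _) hle)
        have h2 := ih (rest.filter (fun v => !decide (v < root)))
          (le_trans (List.length_filter_le _ _) hle)
        have hrev : post.reverse = root :: rest.reverse := by
          rw [hsplit]; simp
        rw [hrev]
        simp only [List.foldl_cons, pvInsert]
        rw [pvInsert_split]
        simp only [List.filter_reverse, decide_not, pvPre, List.nil_append, List.cons_append]
        rw [h1, h2]
        simp

theorem pvB_eq_pre_fold (post : List Int) :
    postorder_to_preorder_alt post = pvPre (post.reverse.foldl pvInsert .leaf) := by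
  unfold postorder_to_preorder_alt
  cases h : post.reverse with
  | nil => simp [pvPre]
  | cons v rest =>
    simp only [List.foldl_cons]
    rw [pvPreLoop_cons]
    simp [pvPreLoop, pvInsert]

-- ===== VERDICT (by name: the statement is the Claim_ definition above) =====
theorem postorder_to_preorder_spec : Claim_equal_postorder_to_preorder := by
  intro post _
  unfold Spec_postorder_to_preorder
  rw [pvA_eq_pre_fold post.length post (le_refl _), pvB_eq_pre_fold]
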